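-- pv_equiv track=rewrite | github.com/hdsysdev/LibreChat | utils/test_update_config.py | extract_models_by_category
-- ===== SOURCE A (Python) =====
-- def extract_models_by_category(models_list):
--     """Extract models organized by category from the OpenRouter output."""
--     categories = {}
--     current_category = None
--
--     for item in models_list:
--         if item.startswith('---') and item.endswith('---'):
--             current_category = item.strip('-')
--         elif current_category and not item.startswith('---'):
--             if current_category not in categories:
--                 categories[current_category] = []
--             categories[current_category].append(item)
--
--     return categories
-- ===== SOURCE B (Python) =====
-- def _is_marker(s):
--     return s.startswith('---') and s.endswith('---')
--
--
-- def _scan_to_marker(xs):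
--     i = 0
--     while i < len(xs) and not _is_marker(xs[i]):
--         i += 1
--     return i
--
--
-- def _drop_to_marker(xs):
--     return xs[_scan_to_marker(xs):]
--
--
-- def _split_segment(xs):
--     i = _scan_to_marker(xs)
--     return xs[:i], xs[i:]
--
--
-- def _extend(categories, name, filtered):
--     prev = categories.get(name)
--     categories[name] = filtered if prev is None else prev + filtered
--
--
-- def _add(categories, name, filtered):
--     if name and filtered:
--         _extend(categories, name, filtered)
--
--
-- def extract_models_by_category(models_list):
--     """Segment-wise regrouping: walk marker-to-marker slices instead of per-item state."""
--     categories = {}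
--     rest = _drop_to_marker(models_list)
--     while rest:
--         name = rest[0].strip('-')
--         content, nxt = _split_segment(rest[1:])
--         filtered = [x for x in content if not x.startswith('---')]
--         _add(categories, name, filtered)
--         rest = nxt
--     return categories
-- ===== Notes on version B (the rewrite author's own statement) =====
-- stated objective: alternative
-- what changed: Replaces A's single pass with per-item category state by a segmentation pass: scan to each marker, split off the slice up to the next marker, filter it, and merge the whole filtered slice into the dict at once (entry created/extended only for a non-empty name and non-empty filtered slice).
import Mathlib
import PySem

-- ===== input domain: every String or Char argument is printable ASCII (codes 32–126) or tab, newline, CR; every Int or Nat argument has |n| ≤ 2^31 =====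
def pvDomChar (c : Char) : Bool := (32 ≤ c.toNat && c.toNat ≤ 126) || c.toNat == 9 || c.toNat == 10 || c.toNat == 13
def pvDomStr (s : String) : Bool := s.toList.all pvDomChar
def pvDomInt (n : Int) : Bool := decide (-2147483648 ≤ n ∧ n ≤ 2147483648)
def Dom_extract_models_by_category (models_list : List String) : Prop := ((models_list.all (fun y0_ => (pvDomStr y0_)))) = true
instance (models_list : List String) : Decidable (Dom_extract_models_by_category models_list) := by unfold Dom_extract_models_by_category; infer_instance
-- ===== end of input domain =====

-- B regroups segment-by-segment (scan to marker, slice, filter, bulk-merge) instead of A's per-item state machine; same values, alternative decomposition.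

-- ===== PORT A =====
-- item.startswith('---') and item.endswith('---')  (shared by both ports)
def pvIsMarker (s : String) : Bool :=
  PySem.Str.startswith s "---" && PySem.Str.endswith s "---"

-- one loop step of A: marker sets current_category; otherwise a truthy current and a non-'---' item get appended
def pvStepA (st : PySem.Dict String (List String) × Option String) (item : String) :
    PySem.Dict String (List String) × Option String :=
  if pvIsMarker item then
    (st.1, some (PySem.Str.stripChars item "-"))
  else
    match st.2 with
    | some c =>
      if c != "" && !(PySem.Str.startswith item "---") then
        let cats := if st.1.contains c then st.1 else st.1.insert c ([] : List String)
        (cats.insert c (cats.getD c [] ++ [item]), some c)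
      else st
    | none => st

def extract_models_by_category (models_list : List String) : List (String × List String) :=
  (models_list.foldl pvStepA (PySem.Dict.empty, none)).1.items

-- ===== PORT B =====
-- _scan_to_marker: index of the first marker (or length)
def pvScanAux (xs : List String) (i : Nat) : Nat :=
  if h : i < xs.length then
    (if pvIsMarker xs[i] then i else pvScanAux xs (i + 1))
  else i
termination_by xs.length - i

def pvDropToMarker (xs : List String) : List String := xs.drop (pvScanAux xs 0)

def pvSplitSegment (xs : List String) : List String × List String :=
  (xs.take (pvScanAux xs 0), xs.drop (pvScanAux xs 0))

-- _extend: merge a block of items into the dict entry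
def pvExtend (cats : PySem.Dict String (List String)) (name : String) (filtered : List String) :
    PySem.Dict String (List String) :=
  match cats.get? name with
  | some prev => cats.insert name (prev ++ filtered)
  | none => cats.insert name filtered

-- _add: only a non-empty name with a non-empty filtered block touches the dict
def pvAdd (cats : PySem.Dict String (List String)) (name : String) (filtered : List String) :
    PySem.Dict String (List String) :=
  if name ≠ "" ∧ filtered ≠ [] then pvExtend cats name filtered else cats

def pvSegLoop (cats : PySem.Dict String (List String)) :
    List String → PySem.Dict String (List String)
  | [] => cats
  | m :: rest =>
    let pr := pvSplitSegment rest
    pvSegLoop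
      (pvAdd cats (PySem.Str.stripChars m "-")
        (pr.1.filter (fun x => !PySem.Str.startswith x "---"))) pr.2
termination_by l => l.length
decreasing_by
  simp [pvSplitSegment]

def extract_models_by_category_alt (models_list : List String) : List (String × List String) :=
  (pvSegLoop PySem.Dict.empty (pvDropToMarker models_list)).items

-- ===== PRECONDITION & SPEC =====
def Spec_extract_models_by_category (models_list : List String) (out : List (String × List String)) : Prop := out = extract_models_by_category_alt models_list
instance (models_list : List String) (out : List (String × List String)) : Decidable (Spec_extract_models_by_category models_list out) := by unfold Spec_extract_models_by_category; infer_instance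

-- ===== CLAIM (what is proved, stated in full; the proofs are below) =====
def Claim_equal_extract_models_by_category : Prop := ∀ (models_list : List String), Dom_extract_models_by_category models_list → Spec_extract_models_by_category models_list (extract_models_by_category models_list)

-- ===== LEMMAS AND PROOFS =====

lemma pvScanAux_succ : ∀ (n : Nat) (t : List String) (x : String) (i : Nat),
    t.length - i ≤ n → pvScanAux (x :: t) (i + 1) = pvScanAux t i + 1 := by
  intro n
  induction n with
  | zero =>
    intro t x i h
    have h1 : ¬ i < t.length := by omega
    have h2 : ¬ i + 1 < (x :: t).length := by simp; omega
    conv_lhs => rw [pvScanAux]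
    conv_rhs => rw [pvScanAux]
    simp [h1]
  | succ n ih =>
    intro t x i h
    conv_lhs => rw [pvScanAux]
    conv_rhs => rw [pvScanAux]
    by_cases hi : i < t.length
    · have hi' : i + 1 < (x :: t).length := by simp; omega
      simp only [hi, hi', dif_pos, List.getElem_cons_succ]
      by_cases hm : pvIsMarker t[i]
      · simp [hm]
      · simp only [hm, Bool.false_eq_true, if_false]
        exact ih t x (i + 1) (by omega)
    · have hi' : ¬ i + 1 < (x :: t).length := by simp; omega
      simp [hi]

lemma pvScanAux_cons (x : String) (t : List String) :
    pvScanAux (x :: t) 0 = if pvIsMarker x then 0 else pvScanAux t 0 + 1 := by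
  conv_lhs => rw [pvScanAux]
  simp only [List.length_cons, Nat.zero_lt_succ, dif_pos, List.getElem_cons_zero]
  by_cases hm : pvIsMarker x
  · simp [hm]
  · simp only [hm, Bool.false_eq_true, if_false]
    exact pvScanAux_succ t.length t x 0 (by omega)

lemma pvTake_scan : ∀ xs : List String,
    xs.take (pvScanAux xs 0) = xs.takeWhile (fun x => !pvIsMarker x) := by
  intro xs
  induction xs with
  | nil => rw [pvScanAux]; simp
  | cons x t ih =>
    rw [pvScanAux_cons]
    by_cases hm : pvIsMarker x
    · simp [hm]
    · simp [hm, ih]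

lemma pvDrop_scan : ∀ xs : List String,
    xs.drop (pvScanAux xs 0) = xs.dropWhile (fun x => !pvIsMarker x) := by
  intro xs
  induction xs with
  | nil => rw [pvScanAux]; simp
  | cons x t ih =>
    rw [pvScanAux_cons]
    by_cases hm : pvIsMarker x
    · simp [hm]
    · simp [hm, ih]

lemma pvSegLoop_cons (cats : PySem.Dict String (List String)) (m : String) (rest : List String) :
    pvSegLoop cats (m :: rest) =
      pvSegLoop
        (pvAdd cats (PySem.Str.stripChars m "-")
          (((rest.takeWhile (fun x => !pvIsMarker x)).filter
            (fun x => !PySem.Str.startswith x "---"))))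
        (rest.dropWhile (fun x => !pvIsMarker x)) := by
  rw [pvSegLoop.eq_2]
  simp only [pvSplitSegment, pvTake_scan, pvDrop_scan]

lemma pvAdd_nil (cats : PySem.Dict String (List String)) (c : String) :
    pvAdd cats c [] = cats := by
  simp [pvAdd]

lemma pvAdd_empty_name (cats : PySem.Dict String (List String)) (l : List String) :
    pvAdd cats "" l = cats := by
  simp [pvAdd]

lemma pvExtend_extend (d : PySem.Dict String (List String)) (c : String) (ys zs : List String) :
    pvExtend (pvExtend d c ys) c zs = pvExtend d c (ys ++ zs) := by
  unfold pvExtend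
  cases h : d.get? c with
  | some v =>
    simp [PySem.Dict.get?_insert_self, PySem.Dict.insert_insert_self]
  | none =>
    simp [PySem.Dict.get?_insert_self, PySem.Dict.insert_insert_self]

-- A's "ensure key, then append one item" is extending by a singleton block
lemma pvStepA_append (d : PySem.Dict String (List String)) (c : String) (x : String) :
    (if d.contains c then d else d.insert c ([] : List String)).insert c
        ((if d.contains c then d else d.insert c ([] : List String)).getD c [] ++ [x])
      = pvExtend d c [x] := by
  unfold pvExtend
  cases h : d.get? c with
  | some v =>
    have hc : d.contains c = true := by
      rw [PySem.Dict.contains_eq_isSome_get?, h]; rfl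
    simp [hc, PySem.Dict.getD_of_get?_eq_some d ([] : List String) h]
  | none =>
    have hc : d.contains c = false := by
      rw [PySem.Dict.contains_eq_isSome_get?, h]; rfl
    simp [hc, PySem.Dict.getD_insert_self, PySem.Dict.insert_insert_self]

-- closed description of one A-step from a set current category
lemma pvStepA_some (cats : PySem.Dict String (List String)) (c x : String) :
    pvStepA (cats, some c) x =
      if pvIsMarker x then (cats, some (PySem.Str.stripChars x "-"))
      else if c ≠ "" ∧ PySem.Str.startswith x "---" = false then (pvExtend cats c [x], some c)
      else (cats, some c) := by
  show (if pvIsMarker x = true then (cats, some (PySem.Str.stripChars x "-"))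
        else if (c != "" && !PySem.Str.startswith x "---") = true then
          ((if cats.contains c = true then cats else cats.insert c ([] : List String)).insert c
            ((if cats.contains c = true then cats
              else cats.insert c ([] : List String)).getD c [] ++ [x]), some c)
        else (cats, some c)) = _
  by_cases hm : pvIsMarker x
  · rw [if_pos hm, if_pos hm]
  · rw [if_neg hm, if_neg hm]
    by_cases hcs : c ≠ "" ∧ PySem.Str.startswith x "---" = false
    · have hb : (c != "" && !PySem.Str.startswith x "---") = true := by
        obtain ⟨h1, h2⟩ := hcs
        rw [h2]
        simpa using h1
      rw [if_pos hb, if_pos hcs, pvStepA_append]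
    · have hb : ¬ (c != "" && !PySem.Str.startswith x "---") = true := by
        intro hk
        apply hcs
        simp only [Bool.and_eq_true, bne_iff_ne, Bool.not_eq_true'] at hk
        exact hk
      rw [if_neg hb, if_neg hcs]

lemma pvStepA_none (cats : PySem.Dict String (List String)) (x : String) :
    pvStepA (cats, none) x =
      if pvIsMarker x then (cats, some (PySem.Str.stripChars x "-"))
      else (cats, none) := by
  show (if pvIsMarker x = true then (cats, some (PySem.Str.stripChars x "-"))
        else (cats, none)) = _
  rfl

lemma pvAdd_extend_cons (d : PySem.Dict String (List String)) (c : String) (hc : c ≠ "")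
    (x : String) (ft : List String) :
    pvAdd (pvExtend d c [x]) c ft = pvAdd d c (x :: ft) := by
  unfold pvAdd
  by_cases hf : ft = []
  · subst hf
    simp [hc]
  · simp [hc, hf, pvExtend_extend]

-- the invariant: from a set current category, A's remaining fold is B's bulk merge of the
-- current segment followed by the segment loop on the rest
lemma pvInvariant : ∀ (rest : List String) (cats : PySem.Dict String (List String)) (c : String),
    (List.foldl pvStepA (cats, some c) rest).1 =
      pvSegLoop
        (pvAdd cats c
          ((rest.takeWhile (fun x => !pvIsMarker x)).filter
            (fun x => !PySem.Str.startswith x "---")))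
        (rest.dropWhile (fun x => !pvIsMarker x)) := by
  intro rest
  induction rest with
  | nil =>
    intro cats c
    simp only [List.foldl_nil, List.takeWhile_nil, List.dropWhile_nil, List.filter_nil,
      pvAdd_nil]
    rw [pvSegLoop.eq_1]
  | cons x t ih =>
    intro cats c
    rw [List.foldl_cons, pvStepA_some]
    by_cases hm : pvIsMarker x
    · rw [if_pos hm, ih]
      simp only [List.takeWhile_cons, List.dropWhile_cons, hm, Bool.not_true,
        Bool.false_eq_true, if_false, List.filter_nil, pvAdd_nil]
      rw [pvSegLoop_cons]
    · simp only [Bool.not_eq_true] at hm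
      rw [if_neg (by simp [hm])]
      by_cases hs : PySem.Str.startswith x "---"
      · rw [if_neg (by intro hk; rw [hs] at hk; exact absurd hk.2 (by decide)), ih]
        simp only [List.takeWhile_cons, List.dropWhile_cons, List.filter_cons, hm, hs,
          Bool.not_true, Bool.not_false, Bool.false_eq_true, if_false, if_true]
      · simp only [Bool.not_eq_true] at hs
        by_cases hc : c = ""
        · rw [if_neg (by intro hk; exact hk.1 hc), ih]
          subst hc
          simp only [List.takeWhile_cons, List.dropWhile_cons, List.filter_cons, hm, hs,
            Bool.not_false, if_true, pvAdd_empty_name]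
        · rw [if_pos ⟨hc, hs⟩, ih, pvAdd_extend_cons cats c hc]
          simp only [List.takeWhile_cons, List.dropWhile_cons, List.filter_cons, hm, hs,
            Bool.not_false, if_true]

lemma pvStart : ∀ (l : List String) (cats : PySem.Dict String (List String)),
    (List.foldl pvStepA (cats, none) l).1 = pvSegLoop cats (pvDropToMarker l) := by
  intro l
  induction l with
  | nil =>
    intro cats
    rw [List.foldl_nil]
    simp only [pvDropToMarker, List.drop_nil]
    rw [pvSegLoop.eq_1]
  | cons x t ih =>
    intro cats
    rw [List.foldl_cons, pvStepA_none]
    simp only [pvDropToMarker, pvDrop_scan]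
    by_cases hm : pvIsMarker x
    · rw [if_pos hm, pvInvariant]
      simp only [List.dropWhile_cons, hm, Bool.not_true, Bool.false_eq_true, if_false]
      rw [pvSegLoop_cons]
    · simp only [Bool.not_eq_true] at hm
      rw [if_neg (by simp [hm])]
      have := ih cats
      simp only [pvDropToMarker, pvDrop_scan] at this
      rw [this]
      simp only [List.dropWhile_cons, hm, Bool.not_false, if_true]

-- ===== VERDICT (by name: the statement is the Claim_ definition above) =====
theorem extract_models_by_category_spec : Claim_equal_extract_models_by_category := by
  intro l _
  unfold Spec_extract_models_by_category extract_models_by_category extract_models_by_category_alt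
  rw [pvStart]
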